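-- pv_equiv track=rewrite | github.com/qingfengmin/Networkcontroller | smart_web/sharing_data.py | __vlan_format
-- ===== SOURCE A (Python) =====
-- def __vlan_format(vlan_list):
--     # 初始化两个长度为 4096 的二进制数组，默认值为 '0'
--     allow_binary_array = ['0'] * 4096
--     change_binary_array = ['0'] * 4096
--
--     # 默认放行 VLAN 1
--     allow_binary_array[2] = '1'  # VLAN 1 对应第 2 个二进制位
--     change_binary_array[2] = '1'
--
--     # 将输入的 VLAN 编号对应的位置设置为 '1'
--     for vlan in vlan_list:
--         if 1 <= vlan <= 4094:  # 确保 VLAN 在有效范围内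
--             allow_binary_array[vlan + 1] = '1'  # VLAN 1 对应第 2 个二进制位
--             change_binary_array[vlan + 1] = '1'
--
--     # 拼接成完整的二进制字符串
--     allow_binary_string = ''.join(allow_binary_array)
--     change_binary_string = ''.join(change_binary_array)
--
--     # 截取中间的 4094 位，去掉首尾两个 '0'
--     allow_binary_string = allow_binary_string[1:-1]
--     change_binary_string = change_binary_string[1:-1]
--
--     # 填充到 4094 位，确保每部分正好 1024 位十六进制数
--     allow_binary_string = allow_binary_string.ljust(4094, '0')
--     change_binary_string = change_binary_string.ljust(4094, '0')
--
--     # 将二进制字符串分割为每 4 位一组，然后转换为十六进制字符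
--     def binary_to_hex(binary_string):
--         hex_result = ''
--         for i in range(0, len(binary_string), 4):
--             chunk = binary_string[i:i+4]
--             # 确保每个 chunk 都是 4 位，不足 4 位时补零
--             chunk = chunk.ljust(4, '0')
--             hex_digit = hex(int(chunk, 2))[2:].upper()  # 转为十六进制并去掉 '0x' 前缀
--             hex_result += hex_digit
--         return hex_result
--
--     # 获取前 1024 位和后 1024 位的十六进制字符串
--     allow_hex_part = binary_to_hex(allow_binary_string[:4094])
--     change_hex_part = binary_to_hex(change_binary_string[:4094])
--
--     # 返回最终的结果
--     return f"{allow_hex_part}:{change_hex_part}"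
-- ===== SOURCE B (Python) =====
-- def __vlan_format(vlan_list):
--     # One set of effective bit positions; both halves of the output are identical.
--     # VLAN 4094's cell is the trailing array cell the original strips off ([1:-1]),
--     # so only VLANs 1..4093 ever reach the output bitmap.
--     bits = {1}  # VLAN 1 is always allowed
--     for vlan in vlan_list:
--         if 1 <= vlan <= 4093:
--             bits.add(vlan)
--     digits = "0123456789ABCDEF"
--     hexpart = "".join(
--         digits[sum(8 >> i for i in range(4) if 4 * k + i in bits)]
--         for k in range(1024)
--     )
--     return hexpart + ":" + hexpart
-- ===== Notes on version B (the rewrite author's own statement) =====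
-- stated objective: simpler
-- what changed: Replaces the two 4096-cell char arrays, string join/slice/ljust and the per-chunk int/hex round-trip with a single set of effective VLAN bits and a direct per-hex-digit computation (both output halves are identical, so one is built).
import Mathlib
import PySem

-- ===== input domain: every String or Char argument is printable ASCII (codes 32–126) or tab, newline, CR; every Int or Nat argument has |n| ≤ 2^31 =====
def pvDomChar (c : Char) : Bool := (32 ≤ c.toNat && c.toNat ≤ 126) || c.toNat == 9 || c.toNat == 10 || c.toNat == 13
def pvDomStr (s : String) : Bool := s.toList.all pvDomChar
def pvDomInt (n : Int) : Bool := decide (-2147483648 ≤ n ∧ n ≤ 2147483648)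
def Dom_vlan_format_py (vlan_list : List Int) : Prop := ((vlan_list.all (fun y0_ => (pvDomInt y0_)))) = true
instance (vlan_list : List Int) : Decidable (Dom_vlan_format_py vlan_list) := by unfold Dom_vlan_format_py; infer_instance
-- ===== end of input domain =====

-- B replaces the two 4096-cell char arrays, the join/slice/ljust string pipeline and the
-- per-chunk int/hex round-trip by one set of effective VLAN bits and a direct per-hex-digit
-- computation (both halves of A's output are identical, so B builds one); objective: simpler.

-- ===== PORT A =====
-- the Python lists hold single-character strings only, so they are ported as List Char
-- (''.join of such a list is then the list itself)

-- hand port of s.ljust(w, fill): appends w - len(s) fill chars (Nat subtraction clamps at 0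
-- exactly as Python appends nothing when len(s) >= w) — exact
def pyLjust (cs : List Char) (w : Nat) (fill : Char) : List Char :=
  cs ++ List.replicate (w - cs.length) fill

-- hand port of hex(n) for n ≥ 0 (the only values A reaches): "0x" + lowercase hex digits — exact for n ≥ 0
def pyHex (n : Int) : List Char :=
  '0' :: 'x' :: Nat.toDigits 16 n.toNat

-- the inner helper binary_to_hex; int(chunk, 2) is PySem.Int.ofCharsBase? — here chunk is
-- always four '0'/'1' chars so it never raises; .getD 0 is unreachable
def binary_to_hex_A (s : List Char) : List Char :=
  (PySem.List.pyRange 0 (PySem.List.len s) 4).foldl (fun hex_result i =>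
    let chunk := PySem.List.slice s (some i) (some (i + 4))
    let chunk := pyLjust chunk 4 '0'
    let hex_digit := PySem.Chars.upper
      (PySem.List.slice (pyHex ((PySem.Int.ofCharsBase? chunk 2).getD 0)) (some 2) none)
    hex_result ++ hex_digit) []

def vlan_format_py (vlan_list : List Int) : String :=
  let allow0 : List Char := List.replicate 4096 '0'
  let change0 : List Char := List.replicate 4096 '0'
  let allow1 := PySem.List.pySetD allow0 2 '1'
  let change1 := PySem.List.pySetD change0 2 '1'
  let p := vlan_list.foldl (fun (p : List Char × List Char) vlan =>
      if 1 ≤ vlan ∧ vlan ≤ 4094 then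
        (PySem.List.pySetD p.1 (vlan + 1) '1', PySem.List.pySetD p.2 (vlan + 1) '1')
      else p)
    (allow1, change1)
  let allow_s := PySem.List.slice p.1 (some 1) (some (-1))
  let change_s := PySem.List.slice p.2 (some 1) (some (-1))
  let allow_s := pyLjust allow_s 4094 '0'
  let change_s := pyLjust change_s 4094 '0'
  let allow_hex := binary_to_hex_A (PySem.List.slice allow_s none (some 4094))
  let change_hex := binary_to_hex_A (PySem.List.slice change_s none (some 4094))
  String.ofList (allow_hex ++ ':' :: change_hex)

-- ===== PORT B =====
-- digits[...] (never out of range here, the sum is 0..15) is pyGetD with an unreachable default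
def vlan_format_py_alt (vlan_list : List Int) : String :=
  let bits : PySem.Set Int := vlan_list.foldl (fun s vlan =>
      if 1 ≤ vlan ∧ vlan ≤ 4093 then PySem.Set.add s vlan else s)
    (PySem.Set.ofList [(1 : Int)])
  let digits := "0123456789ABCDEF".toList
  let hexpart := (List.range 1024).map (fun k =>
    PySem.List.pyGetD digits
      ((((List.range 4).filter (fun i => PySem.Set.contains bits ((4 * k + i : Nat) : Int))).map
          (fun i => (8 : Int) >>> i)).sum) '0')
  String.ofList (hexpart ++ ':' :: hexpart)

-- ===== PRECONDITION & SPEC =====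
def Spec_vlan_format_py (vlan_list : List Int) (out : String) : Prop := out = vlan_format_py_alt vlan_list
instance (vlan_list : List Int) (out : String) : Decidable (Spec_vlan_format_py vlan_list out) := by unfold Spec_vlan_format_py; infer_instance

-- ===== CLAIM (what is proved, stated in full; the proofs are below) =====
def Claim_equal_vlan_format_py : Prop := ∀ (vlan_list : List Int), Dom_vlan_format_py vlan_list → Spec_vlan_format_py vlan_list (vlan_format_py vlan_list)

-- ===== LEMMAS AND PROOFS =====
set_option maxRecDepth 200000

-- the effective bit mask both programs render
def maskOf (l : List Int) (j : Nat) : Bool :=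
  decide (j = 1 ∨ (1 ≤ j ∧ j ≤ 4093 ∧ (j : Int) ∈ l))

def b2c (b : Bool) : Char := if b then '1' else '0'

-- B side: membership in the built set
lemma mem_bits (l : List Int) (x : Int) :
    x ∈ l.foldl (fun s vlan => if 1 ≤ vlan ∧ vlan ≤ 4093 then PySem.Set.add s vlan else s)
        (PySem.Set.ofList [(1 : Int)])
      ↔ x = 1 ∨ (1 ≤ x ∧ x ≤ 4093 ∧ x ∈ l) := by
  suffices h : ∀ (l : List Int) (s : PySem.Set Int),
      x ∈ l.foldl (fun s vlan => if 1 ≤ vlan ∧ vlan ≤ 4093 then PySem.Set.add s vlan else s) s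
        ↔ x ∈ s ∨ (1 ≤ x ∧ x ≤ 4093 ∧ x ∈ l) by
    rw [h]
    simp [PySem.Set.mem_ofList]
  intro l
  induction l with
  | nil => simp
  | cons v tl ih =>
    intro s
    simp only [List.foldl_cons, List.mem_cons]
    by_cases hv : 1 ≤ v ∧ v ≤ 4093
    · rw [if_pos hv, ih, PySem.Set.mem_add]
      constructor
      · rintro (⟨h | h⟩ | h)
        · exact Or.inl h
        · subst h; exact Or.inr ⟨hv.1, hv.2, Or.inl rfl⟩
        · exact Or.inr ⟨h.1, h.2.1, Or.inr h.2.2⟩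
      · rintro (h | ⟨h1, h2, h3 | h3⟩)
        · exact Or.inl (Or.inl h)
        · subst h3; exact Or.inl (Or.inr rfl)
        · exact Or.inr ⟨h1, h2, h3⟩
    · rw [if_neg hv, ih]
      constructor
      · rintro (h | h)
        · exact Or.inl h
        · exact Or.inr ⟨h.1, h.2.1, Or.inr h.2.2⟩
      · rintro (h | ⟨h1, h2, h3 | h3⟩)
        · exact Or.inl h
        · exact (hv (h3 ▸ ⟨h1, h2⟩)).elim
        · exact Or.inr ⟨h1, h2, h3⟩

lemma contains_bits (l : List Int) (j : Nat) :
    PySem.Set.contains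
      (l.foldl (fun s vlan => if 1 ≤ vlan ∧ vlan ≤ 4093 then PySem.Set.add s vlan else s)
        (PySem.Set.ofList [(1 : Int)])) ((j : Nat) : Int) = maskOf l j := by
  rw [PySem.Set.contains_eq_decide, maskOf]
  have := mem_bits l (j : Int)
  simp only [this]
  apply decide_eq_decide.mpr
  constructor
  · rintro (h | ⟨h1, h2, h3⟩)
    · exact Or.inl (by exact_mod_cast h)
    · exact Or.inr ⟨by exact_mod_cast h1, by exact_mod_cast h2, h3⟩
  · rintro (h | ⟨h1, h2, h3⟩)
    · exact Or.inl (by exact_mod_cast h)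
    · exact Or.inr ⟨by exact_mod_cast h1, by exact_mod_cast h2, h3⟩

def hexDigitOf (a b c d : Bool) : Char :=
  PySem.List.pyGetD "0123456789ABCDEF".toList
    ((if a then 8 else 0) + (if b then 4 else 0) + (if c then 2 else 0) + (if d then 1 else 0) : Int) '0'

lemma digitB_eq (l : List Int) (k : Nat) :
    PySem.List.pyGetD "0123456789ABCDEF".toList
      ((((List.range 4).filter (fun i => PySem.Set.contains
            (l.foldl (fun s vlan => if 1 ≤ vlan ∧ vlan ≤ 4093 then PySem.Set.add s vlan else s)
              (PySem.Set.ofList [(1 : Int)])) ((4 * k + i : Nat) : Int))).map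
          (fun i => (8 : Int) >>> i)).sum) '0'
    = hexDigitOf (maskOf l (4 * k)) (maskOf l (4 * k + 1)) (maskOf l (4 * k + 2)) (maskOf l (4 * k + 3)) := by
  have h4 : (List.range 4) = [0, 1, 2, 3] := rfl
  rw [h4]
  simp only [List.filter, contains_bits, Nat.add_zero]
  rcases maskOf l (4 * k) <;> rcases maskOf l (4 * k + 1) <;>
    rcases maskOf l (4 * k + 2) <;> rcases maskOf l (4 * k + 3) <;>
      simp [hexDigitOf] <;> rfl

lemma coreChar (a b c d : Bool) :
    PySem.Chars.upper (PySem.List.slice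
      (pyHex ((PySem.Int.ofCharsBase? [b2c a, b2c b, b2c c, b2c d] 2).getD 0)) (some 2) none)
    = [hexDigitOf a b c d] := by
  rcases a <;> rcases b <;> rcases c <;> rcases d <;> decide

-- A side: the fold keeps the two arrays identical
lemma foldA_snd (l : List Int) (p : List Char × List Char) (h : p.1 = p.2) :
    (l.foldl (fun (p : List Char × List Char) vlan =>
      if 1 ≤ vlan ∧ vlan ≤ 4094 then
        (PySem.List.pySetD p.1 (vlan + 1) '1', PySem.List.pySetD p.2 (vlan + 1) '1')
      else p) p).2
    = (l.foldl (fun (p : List Char × List Char) vlan =>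
      if 1 ≤ vlan ∧ vlan ≤ 4094 then
        (PySem.List.pySetD p.1 (vlan + 1) '1', PySem.List.pySetD p.2 (vlan + 1) '1')
      else p) p).1 := by
  induction l generalizing p with
  | nil => simp [h]
  | cons v tl ih =>
    simp only [List.foldl_cons]
    split_ifs with hv
    · exact ih _ (by rw [h])
    · exact ih _ h

lemma foldA_len (l : List Int) (p : List Char × List Char) :
    (l.foldl (fun (p : List Char × List Char) vlan =>
      if 1 ≤ vlan ∧ vlan ≤ 4094 then
        (PySem.List.pySetD p.1 (vlan + 1) '1', PySem.List.pySetD p.2 (vlan + 1) '1')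
      else p) p).1.length = p.1.length := by
  induction l generalizing p with
  | nil => rfl
  | cons v tl ih =>
    simp only [List.foldl_cons]
    split_ifs with hv
    · rw [ih, PySem.List.pySetD_of_nonneg p.1 '1' (by omega), List.length_set]
    · exact ih p

lemma foldA_get (l : List Int) (a b : List Char) (i : Nat) (hi : i < a.length) :
    (l.foldl (fun (p : List Char × List Char) vlan =>
      if 1 ≤ vlan ∧ vlan ≤ 4094 then
        (PySem.List.pySetD p.1 (vlan + 1) '1', PySem.List.pySetD p.2 (vlan + 1) '1')
      else p) (a, b)).1[i]?
    = if ∃ v ∈ l, (1 ≤ v ∧ v ≤ 4094) ∧ (i : Int) = v + 1 then some '1' else a[i]? := by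
  induction l generalizing a b with
  | nil => simp
  | cons v tl ih =>
    simp only [List.foldl_cons]
    by_cases hv : 1 ≤ v ∧ v ≤ 4094
    · rw [if_pos hv, PySem.List.pySetD_of_nonneg a '1' (by omega : (0:Int) ≤ v + 1),
          ih (a.set (v + 1).toNat '1') _ (by simpa using hi), List.getElem?_set]
      by_cases hiv : (i : Int) = v + 1
      · have ht : (v + 1).toNat = i := by omega
        have hex : ∃ w ∈ v :: tl, (1 ≤ w ∧ w ≤ 4094) ∧ (i : Int) = w + 1 :=
          ⟨v, List.mem_cons_self, ⟨hv, hiv⟩⟩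
        rw [if_pos hex]
        split_ifs <;> first | rfl | omega
      · have hne : (v + 1).toNat ≠ i := by omega
        rw [if_neg hne]
        have hiff : (∃ w ∈ v :: tl, (1 ≤ w ∧ w ≤ 4094) ∧ (i : Int) = w + 1)
             ↔ (∃ w ∈ tl, (1 ≤ w ∧ w ≤ 4094) ∧ (i : Int) = w + 1) := by
          constructor
          · rintro ⟨w, hw, hww, hwi⟩
            rcases List.mem_cons.mp hw with h | h
            · exact absurd hwi (by rw [h]; exact hiv)
            · exact ⟨w, h, hww, hwi⟩
          · rintro ⟨w, hw, hww, hwi⟩; exact ⟨w, List.mem_cons_of_mem _ hw, hww, hwi⟩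
        simp only [hiff]
    · rw [if_neg hv, ih _ _ hi]
      have hiff : (∃ w ∈ v :: tl, (1 ≤ w ∧ w ≤ 4094) ∧ (i : Int) = w + 1)
           ↔ (∃ w ∈ tl, (1 ≤ w ∧ w ≤ 4094) ∧ (i : Int) = w + 1) := by
        constructor
        · rintro ⟨w, hw, hww, hwi⟩
          rcases List.mem_cons.mp hw with h | h
          · exact absurd hww (by rw [h]; exact hv)
          · exact ⟨w, h, hww, hwi⟩
        · rintro ⟨w, hw, hww, hwi⟩; exact ⟨w, List.mem_cons_of_mem _ hw, hww, hwi⟩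
      simp only [hiff]

-- reading four consecutive cells of a range-map
lemma take4_drop (g : Nat → Char) (n j : Nat) (h : j + 4 ≤ n) :
    List.take 4 (List.drop j ((List.range n).map g)) = [g j, g (j + 1), g (j + 2), g (j + 3)] := by
  apply List.ext_getElem
  · simp; omega
  · intro i h1 h2
    simp only [List.getElem_take, List.getElem_drop, List.getElem_map, List.getElem_range]
    have hi4 : i < 4 := by simp at h2; omega
    interval_cases i <;> rfl

lemma take2_drop (g : Nat → Bool) (n j : Nat) (h : j + 2 = n) :
    List.take 4 (List.drop j ((List.range n).map (fun x => b2c (g x)))) = [b2c (g j), b2c (g (j + 1))] := by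
  apply List.ext_getElem
  · simp; omega
  · intro i h1 h2
    simp only [List.getElem_take, List.getElem_drop, List.getElem_map, List.getElem_range]
    have hi2 : i < 2 := by simp at h2; omega
    interval_cases i <;> rfl

-- A's binary_to_hex on the bit string rendered from a mask
lemma binary_to_hex_eq (m : Nat → Bool) (h94 : m 4094 = false) (h95 : m 4095 = false) :
    binary_to_hex_A ((List.range 4094).map (fun j => b2c (m j)))
    = (List.range 1024).map (fun k =>
        hexDigitOf (m (4 * k)) (m (4 * k + 1)) (m (4 * k + 2)) (m (4 * k + 3))) := by
  unfold binary_to_hex_A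
  have hlen : PySem.List.len ((List.range 4094).map (fun j => b2c (m j))) = (4094 : Int) := by
    simp [PySem.List.len_eq]
  rw [hlen]
  rw [PySem.List.pyRange_of_pos 0 4094 (by norm_num)]
  have hrange : (if (0:Int) < 4094 then (((4094:Int) - 0 + 4 - 1) / 4).toNat else 0) = 1024 := by
    decide
  rw [hrange]
  rw [List.foldl_map]
  rw [PySem.List.foldl_append_eq_flatMap
      (fun k : Nat =>
        let chunk := PySem.List.slice ((List.range 4094).map (fun j => b2c (m j)))
          (some (0 + 4 * (k : Int))) (some (0 + 4 * (k : Int) + 4))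
        let chunk := pyLjust chunk 4 '0'
        PySem.Chars.upper
          (PySem.List.slice (pyHex ((PySem.Int.ofCharsBase? chunk 2).getD 0)) (some 2) none))
      (List.range 1024) []]
  rw [List.nil_append]
  have hpt : ∀ k ∈ List.range 1024,
      (let chunk := PySem.List.slice ((List.range 4094).map (fun j => b2c (m j)))
          (some (0 + 4 * (k : Int))) (some (0 + 4 * (k : Int) + 4))
       let chunk := pyLjust chunk 4 '0'
       PySem.Chars.upper
          (PySem.List.slice (pyHex ((PySem.Int.ofCharsBase? chunk 2).getD 0)) (some 2) none))
      = [hexDigitOf (m (4 * k)) (m (4 * k + 1)) (m (4 * k + 2)) (m (4 * k + 3))] := by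
    intro k hk
    rw [List.mem_range] at hk
    have hcast : (0 + 4 * (k : Int)) = ((4 * k : Nat) : Int) := by push_cast; ring
    have hcast2 : (0 + 4 * (k : Int) + 4) = ((4 * k : Nat) : Int) + ((4 : Nat) : Int) := by
      push_cast; ring
    show PySem.Chars.upper
      (PySem.List.slice (pyHex ((PySem.Int.ofCharsBase?
        (pyLjust (PySem.List.slice ((List.range 4094).map (fun j => b2c (m j)))
          (some (0 + 4 * (k : Int))) (some (0 + 4 * (k : Int) + 4))) 4 '0') 2).getD 0))
        (some 2) none) = _
    rw [hcast2, hcast, PySem.List.slice_natCast_add]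
    by_cases hk3 : k < 1023
    · rw [take4_drop _ _ _ (by omega)]
      have hlj : pyLjust [b2c (m (4 * k)), b2c (m (4 * k + 1)), b2c (m (4 * k + 2)), b2c (m (4 * k + 3))] 4 '0'
          = [b2c (m (4 * k)), b2c (m (4 * k + 1)), b2c (m (4 * k + 2)), b2c (m (4 * k + 3))] := by
        simp [pyLjust]
      rw [hlj]
      exact coreChar _ _ _ _
    · have hk' : k = 1023 := by omega
      subst hk'
      rw [take2_drop m 4094 (4 * 1023) (by norm_num)]
      have hlj : pyLjust [b2c (m (4 * 1023)), b2c (m (4 * 1023 + 1))] 4 '0'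
          = [b2c (m (4 * 1023)), b2c (m (4 * 1023 + 1)), b2c false, b2c false] := by
        simp [pyLjust, b2c]
      rw [hlj]
      have h2 : m (4 * 1023 + 2) = false := by norm_num [h94]
      have h3 : m (4 * 1023 + 3) = false := by norm_num [h95]
      rw [h2, h3]
      exact coreChar _ _ false false
  rw [List.flatMap_def, List.map_congr_left hpt, ← List.flatMap_def, ← List.map_eq_flatMap]

lemma slice_mid (xs : List Char) (h : xs.length = 4096) :
    PySem.List.slice xs (some 1) (some (-1)) = (xs.drop 1).take 4094 := by
  simp [PySem.List.slice, h]

lemma mask_4094 (l : List Int) : maskOf l 4094 = false := by simp [maskOf]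
lemma mask_4095 (l : List Int) : maskOf l 4095 = false := by simp [maskOf]

-- the sliced allow bitstring is the rendering of the mask
lemma sliceA (l : List Int) :
    PySem.List.slice
      ((l.foldl (fun (p : List Char × List Char) vlan =>
        if 1 ≤ vlan ∧ vlan ≤ 4094 then
          (PySem.List.pySetD p.1 (vlan + 1) '1', PySem.List.pySetD p.2 (vlan + 1) '1')
        else p)
        (PySem.List.pySetD (List.replicate 4096 '0') 2 '1',
         PySem.List.pySetD (List.replicate 4096 '0') 2 '1')).1)
      (some 1) (some (-1))
    = (List.range 4094).map (fun j => b2c (maskOf l j)) := by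
  have ha0 : PySem.List.pySetD (List.replicate 4096 '0') 2 '1'
      = (List.replicate 4096 '0').set 2 '1' := by
    rw [PySem.List.pySetD_of_nonneg _ _ (by norm_num)]
    rfl
  have hlen0 : (PySem.List.pySetD (List.replicate 4096 '0') 2 '1').length = 4096 := by
    rw [ha0, List.length_set, List.length_replicate]
  have hlen : ((l.foldl (fun (p : List Char × List Char) vlan =>
        if 1 ≤ vlan ∧ vlan ≤ 4094 then
          (PySem.List.pySetD p.1 (vlan + 1) '1', PySem.List.pySetD p.2 (vlan + 1) '1')
        else p)
        (PySem.List.pySetD (List.replicate 4096 '0') 2 '1',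
         PySem.List.pySetD (List.replicate 4096 '0') 2 '1')).1).length = 4096 := by
    rw [foldA_len
      (p := (PySem.List.pySetD (List.replicate 4096 '0') 2 '1',
             PySem.List.pySetD (List.replicate 4096 '0') 2 '1'))]
    exact hlen0
  rw [slice_mid _ hlen]
  apply List.ext_getElem
  · rw [List.length_take, List.length_drop, hlen, List.length_map, List.length_range]
    omega
  · intro j h1 h2
    have hj : j < 4094 := by simpa [hlen] using h2
    simp only [List.getElem_take, List.getElem_drop, List.getElem_map, List.getElem_range]
    have hget := foldA_get l (PySem.List.pySetD (List.replicate 4096 '0') 2 '1')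
      (PySem.List.pySetD (List.replicate 4096 '0') 2 '1') (1 + j) (by rw [hlen0]; omega)
    have hCiff : (∃ v ∈ l, (1 ≤ v ∧ v ≤ 4094) ∧ ((1 + j : Nat) : Int) = v + 1)
        ↔ (1 ≤ j ∧ (j : Int) ∈ l) := by
      constructor
      · rintro ⟨v, hv, ⟨hv1, hv2⟩, heq⟩
        have hvj : v = (j : Int) := by push_cast at heq; omega
        exact ⟨by omega, hvj ▸ hv⟩
      · rintro ⟨h1j, hm⟩
        exact ⟨(j : Int), hm, ⟨by omega, by omega⟩, by push_cast; ring⟩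
    have harr : (PySem.List.pySetD (List.replicate 4096 '0') 2 '1')[1 + j]?
        = some (if 2 = 1 + j then '1' else '0') := by
      rw [ha0, List.getElem?_set, List.length_replicate, List.getElem?_replicate]
      split_ifs with hc1 hc2 hc3 <;> first | rfl | omega
    rw [harr] at hget
    have hval : (if ∃ v ∈ l, (1 ≤ v ∧ v ≤ 4094) ∧ ((1 + j : Nat) : Int) = v + 1
          then some '1' else some (if 2 = 1 + j then '1' else '0'))
        = some (b2c (maskOf l j)) := by
      by_cases hC : ∃ v ∈ l, (1 ≤ v ∧ v ≤ 4094) ∧ ((1 + j : Nat) : Int) = v + 1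
      · rw [if_pos hC]
        have hm := hCiff.mp hC
        have : maskOf l j = true := by
          rw [maskOf, decide_eq_true_eq]
          exact Or.inr ⟨hm.1, by omega, hm.2⟩
        rw [this]; rfl
      · rw [if_neg hC]
        by_cases hj1 : j = 1
        · subst hj1
          have : maskOf l 1 = true := by
            rw [maskOf, decide_eq_true_eq]; exact Or.inl rfl
          rw [this, if_pos (by omega)]; rfl
        · have hnm : ¬ (1 ≤ j ∧ (j : Int) ∈ l) := fun h => hC (hCiff.mpr h)
          have : maskOf l j = false := by
            simp only [maskOf, decide_eq_false_iff_not]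
            rintro (h | ⟨ha, hb, hcc⟩)
            · exact hj1 h
            · exact hnm ⟨ha, hcc⟩
          rw [this, if_neg (by omega)]; rfl
    rw [hval] at hget
    have := List.getElem?_eq_getElem (l := (l.foldl (fun (p : List Char × List Char) vlan =>
        if 1 ≤ vlan ∧ vlan ≤ 4094 then
          (PySem.List.pySetD p.1 (vlan + 1) '1', PySem.List.pySetD p.2 (vlan + 1) '1')
        else p)
        (PySem.List.pySetD (List.replicate 4096 '0') 2 '1',
         PySem.List.pySetD (List.replicate 4096 '0') 2 '1')).1) (i := 1 + j) (by omega)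
    rw [this] at hget
    exact Option.some.inj hget

lemma ljust_noop (f : Nat → Char) : pyLjust ((List.range 4094).map f) 4094 '0' = (List.range 4094).map f := by
  simp [pyLjust]

lemma slice4094_noop (f : Nat → Char) :
    PySem.List.slice ((List.range 4094).map f) none (some 4094) = (List.range 4094).map f := by
  rw [PySem.List.slice_to _ (by norm_num)]
  apply List.take_of_length_le
  simp

-- ===== VERDICT (by name: the statement is the Claim_ definition above) =====
theorem vlan_format_py_spec : Claim_equal_vlan_format_py := by
  intro l _
  unfold Spec_vlan_format_py
  simp only [vlan_format_py, vlan_format_py_alt]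
  rw [foldA_snd l _ rfl]
  rw [sliceA l]
  rw [ljust_noop, slice4094_noop]
  rw [binary_to_hex_eq (maskOf l) (mask_4094 l) (mask_4095 l)]
  simp only [digitB_eq]
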